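-- pv_equiv track=rewrite | github.com/josteint/sidfinity | src/sidfinity_pack.py | _strip_dummy_labels
-- ===== SOURCE A (Python) =====
-- def _strip_dummy_labels(source):
--     """Remove the #ifndef mt_songtbllo ... #endif block from the player source.
--
--     The player defines all data labels as mt_dummydata for standalone testing.
--     When packing, we remove this block so our data section can define the
--     real label addresses.
--     """
--     lines = source.split('\n')
--     out = []
--     skip = False
--     for line in lines:
--         stripped = line.strip()
--         if stripped == '#ifndef mt_songtbllo':
--             skip = True
--             continue
--         if skip and stripped == '#endif':
--             skip = False
--             continue
--         if not skip:
--             # Also strip the mt_dummy label (only used by dummy block)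
--             if stripped.startswith('mt_dummy'):
--                 continue
--             out.append(line)
--     return '\n'.join(out)
-- ===== SOURCE B (Python) =====
-- def _drop_ifndef_blocks(lines):
--     result = []
--     i = 0
--     n = len(lines)
--     while i < n:
--         if lines[i].strip() == '#ifndef mt_songtbllo':
--             # skip forward to the matching #endif (or to the end)
--             i += 1
--             while i < n and lines[i].strip() != '#endif':
--                 i += 1
--             i += 1  # also skip the #endif itself
--         else:
--             result.append(lines[i])
--             i += 1
--     return result
--
--
-- def _strip_dummy_labels(source):
--     kept = _drop_ifndef_blocks(source.split('\n'))
--     return '\n'.join(ln for ln in kept if not ln.strip().startswith('mt_dummy'))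
-- ===== Notes on version B (the rewrite author's own statement) =====
-- stated objective: alternative
-- what changed: Replaces A's single pass with a boolean skip flag by two separate passes: an index-based scanner that excises each ifndef-guard segment by jumping the index past its terminator, followed by an unconditional filter of dummy-label lines.
import Mathlib
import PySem

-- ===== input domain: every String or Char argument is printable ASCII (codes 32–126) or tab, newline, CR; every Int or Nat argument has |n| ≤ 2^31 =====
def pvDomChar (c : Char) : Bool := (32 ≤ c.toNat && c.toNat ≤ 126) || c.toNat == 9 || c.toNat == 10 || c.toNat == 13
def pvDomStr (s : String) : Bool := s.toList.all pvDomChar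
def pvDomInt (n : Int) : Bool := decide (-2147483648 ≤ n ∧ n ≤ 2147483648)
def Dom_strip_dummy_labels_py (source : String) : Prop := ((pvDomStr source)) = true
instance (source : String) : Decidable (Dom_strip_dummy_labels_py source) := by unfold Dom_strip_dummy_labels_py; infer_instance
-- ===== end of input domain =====

-- B replaces A's single pass with a skip flag by two passes: a segment scanner that
-- excises each ifndef-guard block, then a filter of the dummy-label lines
-- (objective: alternative decomposition; return value proved equal).

-- ===== PORT A =====
-- one step of A's loop over lines; state = (out, skip)
def pvStepA (st : List String × Bool) (line : String) : List String × Bool :=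
  let stripped := PySem.Str.strip line
  if stripped == "#ifndef mt_songtbllo" then (st.1, true)
  else if st.2 && (stripped == "#endif") then (st.1, false)
  else if !st.2 then
    (if PySem.Str.startswith stripped "mt_dummy" then st else (st.1 ++ [line], st.2))
  else st

-- source.split('\n') = split? with non-empty sep, hence always some; .getD [] is exact
def strip_dummy_labels_py (source : String) : String :=
  let lines := (PySem.Str.split? source "\n").getD []
  let res := lines.foldl pvStepA ([], false)
  PySem.Str.join "\n" res.1

-- ===== PORT B =====
-- inner while of B: advance past lines until (and including) the first '#endif'
def pvSkipBlock : List String → List String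
  | [] => []
  | l :: rest => if PySem.Str.strip l == "#endif" then rest else pvSkipBlock rest

theorem pvSkipBlock_length_le : ∀ (xs : List String), (pvSkipBlock xs).length ≤ xs.length
  | [] => le_refl _
  | l :: rest => by
      unfold pvSkipBlock
      split
      · exact Nat.le_succ _
      · exact Nat.le_trans (pvSkipBlock_length_le rest) (Nat.le_succ _)

-- outer while of B (_drop_ifndef_blocks), as recursion on the remaining lines
def pvDropBlocks : List String → List String
  | [] => []
  | l :: rest =>
      if PySem.Str.strip l == "#ifndef mt_songtbllo" then pvDropBlocks (pvSkipBlock rest)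
      else l :: pvDropBlocks rest
termination_by xs => xs.length
decreasing_by
  · exact Nat.lt_succ_of_le (pvSkipBlock_length_le rest)
  · simp

def strip_dummy_labels_py_alt (source : String) : String :=
  let kept := pvDropBlocks ((PySem.Str.split? source "\n").getD [])
  PySem.Str.join "\n"
    (kept.filter (fun ln => !(PySem.Str.startswith (PySem.Str.strip ln) "mt_dummy")))

-- ===== PRECONDITION & SPEC =====
def Spec_strip_dummy_labels_py (source : String) (out : String) : Prop := out = strip_dummy_labels_py_alt source
instance (source : String) (out : String) : Decidable (Spec_strip_dummy_labels_py source out) := by unfold Spec_strip_dummy_labels_py; infer_instance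

-- ===== CLAIM (what is proved, stated in full; the proofs are below) =====
def Claim_equal_strip_dummy_labels_py : Prop := ∀ (source : String), Dom_strip_dummy_labels_py source → Spec_strip_dummy_labels_py source (strip_dummy_labels_py source)

-- ===== LEMMAS AND PROOFS =====

-- while A is in skip mode it behaves like restarting (skip = false) after pvSkipBlock
theorem pvFoldA_skip (lines : List String) : ∀ (acc : List String),
    (lines.foldl pvStepA (acc, true)).1 = ((pvSkipBlock lines).foldl pvStepA (acc, false)).1 := by
  induction lines with
  | nil => intro acc; simp [pvSkipBlock]
  | cons l rest ih =>
      intro acc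
      by_cases hend : PySem.Str.strip l == "#endif"
      · have hm : (PySem.Str.strip l == "#ifndef mt_songtbllo") = false := by
          revert hend
          by_cases h : PySem.Str.strip l = "#endif" <;> simp [h]
        simp [pvSkipBlock, hend, List.foldl, pvStepA, hm]
      · by_cases hm : PySem.Str.strip l == "#ifndef mt_songtbllo" <;>
          simp [pvSkipBlock, hend, List.foldl, pvStepA, hm, ih]

-- A's loop from skip = false equals B's two passes, with accumulator
theorem pvFoldA_eq (lines : List String) : ∀ (acc : List String),
    (lines.foldl pvStepA (acc, false)).1 =
      acc ++ (pvDropBlocks lines).filter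
        (fun ln => !(PySem.Str.startswith (PySem.Str.strip ln) "mt_dummy")) := by
  induction hn : lines.length using Nat.strong_induction_on generalizing lines with
  | _ n ih =>
    cases lines with
    | nil => intro acc; simp [pvDropBlocks]
    | cons l rest =>
      intro acc
      subst hn
      by_cases hm : PySem.Str.strip l == "#ifndef mt_songtbllo"
      · have h1 : (pvSkipBlock rest).length < (l :: rest).length :=
          Nat.lt_succ_of_le (pvSkipBlock_length_le rest)
        simp only [List.foldl, pvStepA, hm, pvDropBlocks, if_true]
        rw [pvFoldA_skip, ih _ h1 _ rfl]
      · by_cases hd : PySem.Str.startswith (PySem.Str.strip l) "mt_dummy" <;>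
          simp at hd <;>
          simp [List.foldl, pvStepA, hm, hd, pvDropBlocks,
            ih rest.length (Nat.lt_succ_self _) rest rfl]

-- ===== VERDICT (by name: the statement is the Claim_ definition above) =====
theorem strip_dummy_labels_py_spec : Claim_equal_strip_dummy_labels_py := by
  intro source _
  unfold Spec_strip_dummy_labels_py strip_dummy_labels_py strip_dummy_labels_py_alt
  simp [pvFoldA_eq]
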